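-- pv_equiv track=rewrite | github.com/burning-calamity/extirpation | online/disrupted_transposition.py | disrupted_transposition_decrypt
-- ===== SOURCE A (Python) =====
-- def _key_order(key: str) -> list[int]:
--     return sorted(range(len(key)), key=lambda i: (key[i], i))
--
-- def disrupted_transposition_decrypt(ciphertext: str, key: str) -> str:
--     """Decrypt text produced by ``disrupted_transposition_encrypt``."""
--     if not key:
--         raise ValueError('key must not be empty')
--
--     cols = len(key)
--     rows = (len(ciphertext) + cols - 1) // cols
--     short_cols = rows * cols - len(ciphertext)
--
--     col_lens = [rows - 1 if c >= cols - short_cols and short_cols > 0 else rows for c in range(cols)]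
--     grid = [['' for _ in range(cols)] for _ in range(rows)]
--
--     idx = 0
--     for c in _key_order(key):
--         for r in range(col_lens[c]):
--             grid[r][c] = ciphertext[idx]
--             idx += 1
--
--     out: list[str] = []
--     for r in range(rows):
--         order = range(cols) if r % 2 == 0 else range(cols - 1, -1, -1)
--         for c in order:
--             if grid[r][c]:
--                 out.append(grid[r][c])
--     return ''.join(out)
-- ===== SOURCE B (Python) =====
-- def _key_order(key: str) -> list[int]:
--     return sorted(range(len(key)), key=lambda i: (key[i], i))
--
-- def disrupted_transposition_decrypt(ciphertext: str, key: str) -> str: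
--     """Decrypt text produced by ``disrupted_transposition_encrypt``."""
--     if not key:
--         raise ValueError('key must not be empty')
--
--     cols = len(key)
--     rows = (len(ciphertext) + cols - 1) // cols
--     short_cols = rows * cols - len(ciphertext)
--     col_lens = [rows - 1 if c >= cols - short_cols and short_cols > 0 else rows for c in range(cols)]
--
--     # per-column strings instead of a rows x cols grid: slice the ciphertext
--     col_text = [''] * cols
--     idx = 0
--     for c in _key_order(key):
--         col_text[c] = ciphertext[idx:idx + col_lens[c]]
--         idx += col_lens[c]
--
--     out: list[str] = []
--     for r in range(rows):
--         order = range(cols) if r % 2 == 0 else range(cols - 1, -1, -1)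
--         for c in order:
--             if r < len(col_text[c]):
--                 out.append(col_text[c][r])
--     return ''.join(out)
-- ===== Notes on version B (the rewrite author's own statement) =====
-- stated objective: simpler
-- what changed: B replaces A's rows x cols sentinel grid (built cell by cell, one character at a time) with per-column strings cut from the ciphertext by slicing, and reads them back with an explicit r < len(column) bound instead of A's empty-cell truthiness test.
import Mathlib
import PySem

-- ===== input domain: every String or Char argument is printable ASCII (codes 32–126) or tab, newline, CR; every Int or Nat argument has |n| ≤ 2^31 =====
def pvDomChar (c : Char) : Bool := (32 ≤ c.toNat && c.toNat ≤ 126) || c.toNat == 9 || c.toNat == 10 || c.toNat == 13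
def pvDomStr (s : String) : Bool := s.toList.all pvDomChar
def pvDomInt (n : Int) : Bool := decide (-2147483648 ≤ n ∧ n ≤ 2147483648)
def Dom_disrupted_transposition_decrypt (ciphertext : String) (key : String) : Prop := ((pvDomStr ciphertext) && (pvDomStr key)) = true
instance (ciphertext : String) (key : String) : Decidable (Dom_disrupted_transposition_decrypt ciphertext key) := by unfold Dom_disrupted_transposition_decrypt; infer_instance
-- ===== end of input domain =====

-- B replaces A's rows×cols sentinel grid with per-column slices of the ciphertext (objective: simpler).
-- Pre_ excludes only the empty key, on which the Python A (and B) raise ValueError.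

-- ===== PORT A =====
-- shared helper _key_order: sorted(range(len(key)), key=lambda i: (key[i], i))
def pvKeyOrder (keyL : List Char) : List Nat :=
  PySem.List.sorted2 (List.range keyL.length) (fun i => keyL.getD i ' ') (fun i => i)

-- col_lens = [rows - 1 if c >= cols - short and short > 0 else rows for c in range(cols)]
-- (Nat subtraction in `cols - short` is exact: short ≤ cols always holds, proved below)
def pvColLens (cols rows short : Nat) : List Nat :=
  (List.range cols).map (fun c => if cols - short ≤ c ∧ 0 < short then rows - 1 else rows)

-- grid[r][c] = x  (a Python cell is a str; here a List Char, '' = [])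
def pvSetCell (g : List (List (List Char))) (r c : Nat) (x : List Char) : List (List (List Char)) :=
  g.set r ((g.getD r []).set c x)

def pvCell (g : List (List (List Char))) (r c : Nat) : List Char :=
  (g.getD r []).getD c []

-- inner loop: for r in range(col_lens[c]): grid[r][c] = ciphertext[idx]; idx += 1
-- (ciphertext[idx] via getD: idx is always in range, proved via the column-length sum)
def pvFillCol (ct : List Char) (c n : Nat) (s : List (List (List Char)) × Nat) :
    List (List (List Char)) × Nat :=
  (List.range n).foldl (fun s r => (pvSetCell s.1 r c [ct.getD s.2 ' '], s.2 + 1)) s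

-- outer loop: for c in _key_order(key): ...
def pvFillGrid (ct : List Char) (colLens : List Nat) (order : List Nat)
    (s : List (List (List Char)) × Nat) : List (List (List Char)) × Nat :=
  order.foldl (fun s c => pvFillCol ct c (colLens.getD c 0) s) s

-- read-out: boustrophedon row scan, skipping empty cells ('if grid[r][c]:')
-- range(cols-1,-1,-1) enumerates the columns cols-1..0, i.e. (List.range cols).reverse
def pvReadA (g : List (List (List Char))) (rows cols : Nat) : List Char :=
  (List.range rows).foldl (fun out r =>
    (if r % 2 == 0 then List.range cols else (List.range cols).reverse).foldl
      (fun out c => if pvCell g r c ≠ [] then out ++ pvCell g r c else out) out) []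

def disrupted_transposition_decrypt (ciphertext : String) (key : String) : String :=
  let ct := ciphertext.toList
  let keyL := key.toList
  if keyL.length = 0 then ""   -- Python: raise ValueError('key must not be empty'); excluded by Pre_
  else
    let cols := keyL.length
    let rows := (ct.length + cols - 1) / cols
    let short := rows * cols - ct.length
    let colLens := pvColLens cols rows short
    let g0 : List (List (List Char)) :=
      (List.range rows).map (fun _ => (List.range cols).map (fun _ => ([] : List Char)))
    let s := pvFillGrid ct colLens (pvKeyOrder keyL) (g0, 0)
    String.ofList (pvReadA s.1 rows cols)

-- ===== PORT B =====
-- col_text[c] = ciphertext[idx : idx + col_lens[c]]; idx += col_lens[c], for c in _key_order(key)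
def pvBuildColText (ct : List Char) (colLens : List Nat) (order : List Nat)
    (s : List (List Char) × Nat) : List (List Char) × Nat :=
  order.foldl (fun s c =>
    (s.1.set c (PySem.List.slice ct (some (s.2 : Int)) (some ((s.2 : Int) + (colLens.getD c 0 : Int)))),
     s.2 + colLens.getD c 0)) s

-- read-out: boustrophedon row scan, appending col_text[c][r] when r < len(col_text[c])
def pvReadB (t : List (List Char)) (rows cols : Nat) : List Char :=
  (List.range rows).foldl (fun out r =>
    (if r % 2 == 0 then List.range cols else (List.range cols).reverse).foldl
      (fun out c => if r < (t.getD c []).length then out ++ [(t.getD c []).getD r ' '] else out) out) []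

def disrupted_transposition_decrypt_alt (ciphertext : String) (key : String) : String :=
  let ct := ciphertext.toList
  let keyL := key.toList
  if keyL.length = 0 then ""   -- Python: raise ValueError('key must not be empty'); excluded by Pre_
  else
    let cols := keyL.length
    let rows := (ct.length + cols - 1) / cols
    let short := rows * cols - ct.length
    let colLens := pvColLens cols rows short
    let t0 : List (List Char) := List.replicate cols []   -- [''] * cols
    let s := pvBuildColText ct colLens (pvKeyOrder keyL) (t0, 0)
    String.ofList (pvReadB s.1 rows cols)

-- ===== PRECONDITION & SPEC =====
-- Pre_ excludes exactly the empty key, on which A raises ValueError (B raises too).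
def Pre_disrupted_transposition_decrypt (ciphertext : String) (key : String) : Prop :=
  key.toList ≠ []
instance (ciphertext : String) (key : String) : Decidable (Pre_disrupted_transposition_decrypt ciphertext key) := by unfold Pre_disrupted_transposition_decrypt; infer_instance

def pvWitness_disrupted_transposition_decrypt : String × String := ("HLEOL WDRLO", "key")

def Spec_disrupted_transposition_decrypt (ciphertext : String) (key : String) (out : String) : Prop := out = disrupted_transposition_decrypt_alt ciphertext key
instance (ciphertext : String) (key : String) (out : String) : Decidable (Spec_disrupted_transposition_decrypt ciphertext key out) := by unfold Spec_disrupted_transposition_decrypt; infer_instance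

-- ===== CLAIM (what is proved, stated in full; the proofs are below) =====
def Claim_equal_disrupted_transposition_decrypt : Prop := ∀ (ciphertext : String) (key : String), Dom_disrupted_transposition_decrypt ciphertext key → Pre_disrupted_transposition_decrypt ciphertext key → Spec_disrupted_transposition_decrypt ciphertext key (disrupted_transposition_decrypt ciphertext key)

-- ===== LEMMAS AND PROOFS =====

-- shape of A's grid: rows rows, each of cols cells
def pvShape (g : List (List (List Char))) (rows cols : Nat) : Prop :=
  g.length = rows ∧ ∀ r < rows, (g.getD r []).length = cols

-- the cell-wise relation between A's grid and B's per-column texts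
def pvRel (g : List (List (List Char))) (t : List (List Char)) (rows cols : Nat) : Prop :=
  ∀ r < rows, ∀ c < cols,
    pvCell g r c = (if r < (t.getD c []).length then [(t.getD c []).getD r ' '] else [])

lemma pvColLens_getD (cols rows short c : Nat) (hc : c < cols) :
    (pvColLens cols rows short).getD c 0 =
      if cols - short ≤ c ∧ 0 < short then rows - 1 else rows := by
  unfold pvColLens
  exact PySem.List.getD_map_range _ _ _ _ hc

lemma pvSetCell_length (g : List (List (List Char))) (r c : Nat) (x : List Char) :
    (pvSetCell g r c x).length = g.length := by
  simp [pvSetCell]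

lemma pvSetCell_row_length (g : List (List (List Char))) (r c : Nat) (x : List Char) (r' : Nat) :
    ((pvSetCell g r c x).getD r' []).length = (g.getD r' []).length := by
  simp only [pvSetCell, List.getD_eq_getElem?_getD, List.getElem?_set]
  split_ifs with h1 h2
  · subst h1; simp [List.length_set]
  · subst h1
    rw [List.getElem?_eq_none_iff.2 (by omega)]
  · rfl

lemma pvCell_setCell (g : List (List (List Char))) (r c : Nat) (x : List Char)
    (hr : r < g.length) (hc : c < (g.getD r []).length) (r' c' : Nat) :
    pvCell (pvSetCell g r c x) r' c' = if r' = r ∧ c' = c then x else pvCell g r' c' := by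
  unfold pvCell pvSetCell
  rw [List.getD_eq_getElem?_getD] at hc
  by_cases h1 : r' = r
  · subst h1
    have hrow : (g.set r' ((g.getD r' []).set c x)).getD r' [] = (g.getD r' []).set c x := by
      simp [List.getD_eq_getElem?_getD, hr]
    rw [hrow]
    by_cases h2 : c' = c
    · subst h2
      rw [if_pos ⟨rfl, rfl⟩]
      simp [List.getD_eq_getElem?_getD, hc]
    · rw [if_neg (by tauto)]
      simp [List.getD_eq_getElem?_getD,
        (show ¬ c = c' from fun h => h2 h.symm)]
  · rw [if_neg (by tauto)]
    have : (g.set r ((g.getD r []).set c x)).getD r' [] = g.getD r' [] := by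
      simp [List.getD_eq_getElem?_getD,
        (show ¬ r = r' from fun h => h1 h.symm)]
    rw [this]

lemma pvListSet_getD (t : List (List Char)) (c : Nat) (v : List Char) (hc : c < t.length)
    (c' : Nat) : ((t.set c v).getD c' []) = if c' = c then v else t.getD c' [] := by
  by_cases h : c' = c
  · subst h; simp [List.getD_eq_getElem?_getD, hc]
  · simp [List.getD_eq_getElem?_getD, h,
      (show ¬ c = c' from fun e => h e.symm)]

lemma pvSliceLen (ct : List Char) (idx n : Nat) (h : idx + n ≤ ct.length) :
    ((ct.drop idx).take n).length = n := by
  simp only [List.length_take, List.length_drop]; omega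

lemma pvSliceGet (ct : List Char) (idx n r : Nat) (hr : r < n) (h : idx + n ≤ ct.length) :
    ((ct.drop idx).take n).getD r ' ' = ct.getD (idx + r) ' ' := by
  simp [List.getD_eq_getElem?_getD, List.getElem?_drop, hr]

lemma pvFillCol_spec (ct : List Char) (c rows cols : Nat) (hc : c < cols) :
    ∀ (n : Nat), n ≤ rows → ∀ (g : List (List (List Char))) (idx : Nat), pvShape g rows cols →
      (pvFillCol ct c n (g, idx)).2 = idx + n ∧
      pvShape (pvFillCol ct c n (g, idx)).1 rows cols ∧
      ∀ r' c', pvCell (pvFillCol ct c n (g, idx)).1 r' c' =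
        if c' = c ∧ r' < n then [ct.getD (idx + r') ' '] else pvCell g r' c' := by
  intro n
  induction n with
  | zero =>
    intro _ g idx hsh
    refine ⟨rfl, hsh, ?_⟩
    intro r' c'; simp [pvFillCol]
  | succ n ih =>
    intro hn g idx hsh
    obtain ⟨hidx, hsh', hcell⟩ := ih (by omega) g idx hsh
    have hstep : pvFillCol ct c (n + 1) (g, idx) =
        (pvSetCell (pvFillCol ct c n (g, idx)).1 n c
          [ct.getD (pvFillCol ct c n (g, idx)).2 ' '],
         (pvFillCol ct c n (g, idx)).2 + 1) := by
      unfold pvFillCol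
      rw [List.range_succ, List.foldl_append]
      rfl
    have hrlt : n < (pvFillCol ct c n (g, idx)).1.length := by
      rw [hsh'.1]; omega
    have hclt : c < (((pvFillCol ct c n (g, idx)).1).getD n []).length := by
      rw [hsh'.2 n (by omega)]; exact hc
    refine ⟨?_, ?_, ?_⟩
    · rw [hstep]; simp only; omega
    · rw [hstep]
      constructor
      · simp only [pvSetCell_length]; exact hsh'.1
      · intro r hr; rw [pvSetCell_row_length]; exact hsh'.2 r hr
    · intro r' c'
      rw [hstep]
      simp only
      rw [pvCell_setCell _ _ _ _ hrlt hclt, hcell, hidx]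
      by_cases h1 : c' = c
      · subst h1
        by_cases h2 : r' < n
        · rw [if_neg (fun h => absurd h.1 (by omega)), if_pos ⟨rfl, h2⟩, if_pos ⟨rfl, by omega⟩]
        · by_cases h3 : r' = n
          · subst h3
            rw [if_pos ⟨rfl, rfl⟩, if_pos ⟨rfl, by omega⟩]
          · rw [if_neg (fun h => absurd h.1 h3), if_neg (by tauto),
              if_neg (fun h => absurd h.2 (by omega))]
      · rw [if_neg (by tauto), if_neg (by tauto), if_neg (by tauto)]

lemma pvFillBuild (ct : List Char) (colLens : List Nat) (rows cols : Nat)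
    (hlen : ∀ c < cols, colLens.getD c 0 ≤ rows) :
    ∀ (order : List Nat) (g : List (List (List Char))) (t : List (List Char)) (idx : Nat),
      (∀ c ∈ order, c < cols) →
      idx + (order.map (fun c => colLens.getD c 0)).sum ≤ ct.length →
      pvShape g rows cols → t.length = cols →
      (∀ c < cols, (t.getD c []).length ≤ colLens.getD c 0) →
      pvRel g t rows cols →
      (pvBuildColText ct colLens order (t, idx)).1.length = cols ∧
      pvRel (pvFillGrid ct colLens order (g, idx)).1
            (pvBuildColText ct colLens order (t, idx)).1 rows cols := by
  intro order
  induction order with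
  | nil => intro g t idx _ _ _ ht _ hrel; exact ⟨ht, hrel⟩
  | cons c rest ih =>
    intro g t idx hmem hidx hsh ht hbd hrel
    have hc : c < cols := hmem c (by simp)
    set n := colLens.getD c 0 with hn
    have hnr : n ≤ rows := hlen c hc
    have hsum : idx + n + (rest.map (fun c => colLens.getD c 0)).sum ≤ ct.length := by
      simp only [List.map_cons, List.sum_cons] at hidx; omega
    have hinr : idx + n ≤ ct.length := by omega
    obtain ⟨hidx1, hsh1, hcell1⟩ := pvFillCol_spec ct c rows cols hc n hnr g idx hsh
    have hslice : PySem.List.slice ct (some (idx : Int)) (some ((idx : Int) + (n : Int))) =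
        (ct.drop idx).take n := PySem.List.slice_natCast_add ct idx n
    have hstepA : pvFillGrid ct colLens (c :: rest) (g, idx) =
        pvFillGrid ct colLens rest (pvFillCol ct c n (g, idx)) := rfl
    have hstepB : pvBuildColText ct colLens (c :: rest) (t, idx) =
        pvBuildColText ct colLens rest
          (t.set c (PySem.List.slice ct (some (idx : Int)) (some ((idx : Int) + (n : Int)))), idx + n) := rfl
    rw [hstepA, hstepB, hslice]
    have hfc : pvFillCol ct c n (g, idx) = ((pvFillCol ct c n (g, idx)).1, idx + n) := by
      rw [← hidx1]
    rw [hfc]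
    have ht1len : (t.set c ((ct.drop idx).take n)).length = cols := by
      rw [List.length_set, ht]
    have ht1getD : ∀ c', (t.set c ((ct.drop idx).take n)).getD c' [] =
        if c' = c then (ct.drop idx).take n else t.getD c' [] := by
      intro c'; exact pvListSet_getD t c _ (by omega) c'
    apply ih _ _ _ (fun c hm => hmem c (by simp [hm])) hsum hsh1 ht1len
    · intro c' hc'
      rw [ht1getD c']
      split_ifs with h
      · subst h; rw [pvSliceLen ct idx n hinr]
      · exact hbd c' hc'
    · -- pvRel (fillCol result) (t.set c slice)
      intro r hr c' hc'
      rw [hcell1 r c', ht1getD c']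
      by_cases hcc : c' = c
      · subst hcc
        rw [if_pos rfl, pvSliceLen ct idx n hinr]
        by_cases hrn : r < n
        · rw [if_pos ⟨rfl, hrn⟩, if_pos hrn, pvSliceGet ct idx n r hrn hinr]
        · rw [if_neg (by tauto), if_neg hrn]
          rw [hrel r hr c' hc', if_neg (by have := hbd c' hc'; omega)]
      · rw [if_neg (by tauto), if_neg hcc, hrel r hr c' hc']

lemma pvRead_eq (g : List (List (List Char))) (t : List (List Char)) (rows cols : Nat)
    (h : pvRel g t rows cols) : pvReadA g rows cols = pvReadB t rows cols := by
  unfold pvReadA pvReadB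
  apply PySem.List.foldl_congr_mem'
  intro r hrmem out
  have hr : r < rows := List.mem_range.1 hrmem
  apply PySem.List.foldl_congr_mem'
  intro c hcmem out'
  have hc : c < cols := by
    rcases (by split at hcmem <;> [exact Or.inl hcmem; exact Or.inr hcmem] :
      c ∈ List.range cols ∨ c ∈ (List.range cols).reverse) with h' | h'
    · exact List.mem_range.1 h'
    · exact List.mem_range.1 (List.mem_reverse.1 h')
  rw [h r hr c hc]
  simp only [List.getD_eq_getElem?_getD]
  by_cases h1 : r < (t[c]?.getD []).length
  · simp [h1]
  · simp [h1]

lemma pvColLens_sum (len cols : Nat) (hc : 0 < cols) :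
    (pvColLens cols ((len + cols - 1) / cols) ((len + cols - 1) / cols * cols - len)).sum = len := by
  set q := (len + cols - 1) / cols with hq
  have hdm := Nat.div_add_mod (len + cols - 1) cols
  have hmod := Nat.mod_lt (len + cols - 1) hc
  rw [Nat.mul_comm] at hdm
  obtain ⟨P, hP⟩ : ∃ P, q * cols = P := ⟨_, rfl⟩
  rw [hP] at hdm
  rw [hP]
  have hlenle : len ≤ P := by omega
  set short := P - len with hshort
  have hsc : short < cols := by omega
  by_cases hz : short = 0
  · have hPlen : P = len := by omega
    rw [hz]
    unfold pvColLens
    simp only [Nat.lt_irrefl, and_false, if_false, List.map_const', List.length_range,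
      List.sum_replicate, smul_eq_mul]
    -- cols * q = P = len
    rw [Nat.mul_comm, hP, hPlen]
  · have hq1 : 1 ≤ q := by
      rcases Nat.eq_zero_or_pos q with h | h
      · exfalso; rw [h, Nat.zero_mul] at hP; omega
      · exact h
    obtain ⟨qq, hqq⟩ : ∃ qq, q = qq + 1 := ⟨q - 1, by omega⟩
    set a := cols - short with ha
    have hcols : cols = a + short := by omega
    unfold pvColLens
    rw [hcols, List.range_add, List.map_append, List.sum_append, List.map_map]
    simp only [Nat.add_sub_cancel]
    have h1 : (List.range a).map (fun c => if a ≤ c ∧ 0 < short then q - 1 else q) =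
        (List.range a).map (fun _ => q) := by
      apply List.map_congr_left
      intro x hx
      have : x < a := List.mem_range.1 hx
      rw [if_neg (by omega)]
    have h2 : (List.range short).map
        ((fun c => if a ≤ c ∧ 0 < short then q - 1 else q) ∘ (fun x => a + x)) =
        (List.range short).map (fun _ => q - 1) := by
      apply List.map_congr_left
      intro x _
      simp only [Function.comp]
      rw [if_pos ⟨by omega, by omega⟩]
    rw [h1, h2]
    simp only [List.map_const', List.length_range, List.sum_replicate, smul_eq_mul]
    -- a * q + short * (q - 1) = len
    rw [hqq, Nat.add_sub_cancel]
    have e2 : a * (qq + 1) + short * qq = a * qq + a + short * qq := by ring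
    rw [e2]
    have hPexp : P = a * qq + a + (short * qq + short) := by
      rw [← hP, hqq, hcols]; ring
    obtain ⟨A, hA⟩ : ∃ A, a * qq = A := ⟨_, rfl⟩
    obtain ⟨B, hB⟩ : ∃ B, short * qq = B := ⟨_, rfl⟩
    rw [hA, hB] at hPexp ⊢
    omega

theorem disrupted_transposition_decrypt_spec : Claim_equal_disrupted_transposition_decrypt := by
  intro ciphertext key hdom hpre
  unfold Spec_disrupted_transposition_decrypt
  have hk : ¬ key.toList.length = 0 := fun h => hpre (List.length_eq_zero_iff.1 h)
  simp only [disrupted_transposition_decrypt, disrupted_transposition_decrypt_alt]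
  rw [if_neg hk, if_neg hk]
  set ct := ciphertext.toList with hct
  set cols := key.toList.length with hcols
  set rows := (ct.length + cols - 1) / cols with hrows
  set short := rows * cols - ct.length with hshort
  set colLens := pvColLens cols rows short with hcl
  have hc0 : 0 < cols := by omega
  -- column lengths are bounded by rows
  have hlen : ∀ c < cols, colLens.getD c 0 ≤ rows := by
    intro c hc
    rw [hcl, pvColLens_getD cols rows short c hc]
    split_ifs
    · exact Nat.sub_le _ _
    · exact Nat.le_refl _
  -- the key order is a permutation of range cols
  have hperm : (pvKeyOrder key.toList).Perm (List.range cols) := by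
    unfold pvKeyOrder
    rw [← hcols]
    exact PySem.List.sorted2_perm _ _ _ _
  have hmem : ∀ c ∈ pvKeyOrder key.toList, c < cols := by
    intro c hcmem
    exact List.mem_range.1 (hperm.mem_iff.1 hcmem)
  -- total width: the column lengths sum to the ciphertext length
  have hsum : ((pvKeyOrder key.toList).map (fun c => colLens.getD c 0)).sum = ct.length := by
    rw [(hperm.map (fun c => colLens.getD c 0)).sum_eq]
    have hid : (List.range cols).map (fun c => colLens.getD c 0) = colLens := by
      rw [hcl]
      unfold pvColLens
      apply List.map_congr_left
      intro c hcm
      exact PySem.List.getD_map_range _ _ _ _ (List.mem_range.1 hcm)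
    rw [hid, hcl, hshort, hrows]
    exact pvColLens_sum ct.length cols hc0
  -- initial grid shape and relation
  have hsh0 : pvShape ((List.range rows).map (fun _ => (List.range cols).map (fun _ => ([] : List Char)))) rows cols := by
    constructor
    · simp
    · intro r hr
      rw [PySem.List.getD_map_range _ _ _ _ hr]
      simp
  have hrel0 : pvRel ((List.range rows).map (fun _ => (List.range cols).map (fun _ => ([] : List Char))))
      (List.replicate cols []) rows cols := by
    intro r hr c hc
    rw [pvCell, PySem.List.getD_map_range _ _ _ _ hr, PySem.List.getD_map_range _ _ _ _ hc]
    simp [List.getD_eq_getElem?_getD, hc]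
  obtain ⟨_, hrel⟩ := pvFillBuild ct colLens rows cols hlen (pvKeyOrder key.toList)
    _ (List.replicate cols []) 0 hmem
    (by rw [Nat.zero_add]; exact le_of_eq hsum) hsh0 (by simp)
    (by intro c hc
        simp [List.getD_eq_getElem?_getD, hc])
    hrel0
  exact congrArg String.ofList (pvRead_eq _ _ rows cols hrel)
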